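-- pv_equiv track=rewrite | github.com/scrallex/tpsl | scripts/research/roc_utils.py | semantic_primary
-- ===== SOURCE A (Python) =====
-- from typing import Dict, Iterable, Iterator, List, Mapping, Optional, Sequence, Tuple
--
-- def semantic_primary(tags: Sequence[str]) -> str:
--     priority = [
--         "highly_stable",
--         "strengthening_structure",
--         "improving_stability",
--         "low_hazard_environment",
--         "high_rupture_event",
--         "chaotic_price_action",
--     ]
--     tags_lower = [tag.lower() for tag in tags if isinstance(tag, str)]
--     for key in priority:
--         if key in tags_lower:
--             return key
--     return tags_lower[0] if tags_lower else "none"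
-- ===== SOURCE B (Python) =====
-- def semantic_primary(tags):
--     priority = [
--         "highly_stable",
--         "strengthening_structure",
--         "improving_stability",
--         "low_hazard_environment",
--         "high_rupture_event",
--         "chaotic_price_action",
--     ]
--     rank = {key: i for i, key in enumerate(priority)}
--     first = None
--     best = None
--     for tag in tags:
--         if not isinstance(tag, str):
--             continue
--         low = tag.lower()
--         if first is None:
--             first = low
--         r = rank.get(low)
--         if r is not None and (best is None or r < best):
--             best = r
--     if best is not None:
--         return priority[best]
--     return first if first is not None else "none"
-- ===== Notes on version B (the rewrite author's own statement) =====
-- stated objective: alternative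
-- what changed: Replaces the six sequential membership scans over the lowered-tag list (for each priority key: 'key in tags_lower') with a single pass over tags that remembers the first lowered tag and keeps a running minimum priority rank via a dict lookup.
import Mathlib
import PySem

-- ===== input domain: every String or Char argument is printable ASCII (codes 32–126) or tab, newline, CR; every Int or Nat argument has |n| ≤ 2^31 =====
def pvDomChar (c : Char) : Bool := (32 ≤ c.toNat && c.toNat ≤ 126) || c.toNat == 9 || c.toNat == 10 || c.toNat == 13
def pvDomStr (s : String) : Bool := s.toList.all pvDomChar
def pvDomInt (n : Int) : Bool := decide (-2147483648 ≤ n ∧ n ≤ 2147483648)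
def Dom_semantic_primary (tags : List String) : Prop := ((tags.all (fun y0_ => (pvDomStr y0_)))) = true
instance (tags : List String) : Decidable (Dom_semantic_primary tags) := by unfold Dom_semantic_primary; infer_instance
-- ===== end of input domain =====

-- B is an alternative decomposition: one pass over the tags tracking the first lowered tag
-- and the minimum priority rank via a dict, instead of A's six membership scans of the lowered list.

-- ===== PORT A =====
-- the literal priority list from A's body
def priorityA : List String :=
  ["highly_stable", "strengthening_structure", "improving_stability",
   "low_hazard_environment", "high_rupture_event", "chaotic_price_action"]

-- 'for key in priority: if key in tags_lower: return key'
def aLoop (tagsLower : List String) : List String → Option String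
  | [] => none
  | k :: ks => if tagsLower.contains k then some k else aLoop tagsLower ks

def semantic_primary (tags : List String) : String :=
  let tagsLower := tags.map PySem.Str.lower
  match aLoop tagsLower priorityA with
  | some k => k
  | none => match tagsLower with
            | [] => "none"
            | t :: _ => t

-- ===== PORT B =====
def priorityB : List String :=
  ["highly_stable", "strengthening_structure", "improving_stability",
   "low_hazard_environment", "high_rupture_event", "chaotic_price_action"]

-- rank = {key: i for i, key in enumerate(priority)}
def rankDict : PySem.Dict String Int :=
  PySem.Dict.ofList
    [("highly_stable", 0), ("strengthening_structure", 1), ("improving_stability", 2),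
     ("low_hazard_environment", 3), ("high_rupture_event", 4), ("chaotic_price_action", 5)]

-- the single pass of B: state = (first, best)
def bLoop : List String → Option String → Option Int → Option String × Option Int
  | [], first, best => (first, best)
  | t :: ts, first, best =>
    let low := PySem.Str.lower t
    let first' := if first.isNone then some low else first
    let best' :=
      match rankDict.get? low with
      | some r => match best with
                  | none => some r
                  | some b => if r < b then some r else some b
      | none => best
    bLoop ts first' best'

def semantic_primary_alt (tags : List String) : String :=
  match bLoop tags none none with
  | (first, best) =>
    match best with
    | some r => (PySem.List.pyGet? priorityB r).getD ""   -- priority[best]; best is always in range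
    | none => match first with
              | some f => f
              | none => "none"

-- ===== PRECONDITION & SPEC =====
def Spec_semantic_primary (tags : List String) (out : String) : Prop := out = semantic_primary_alt tags
instance (tags : List String) (out : String) : Decidable (Spec_semantic_primary tags out) := by unfold Spec_semantic_primary; infer_instance

-- ===== CLAIM (what is proved, stated in full; the proofs are below) =====
def Claim_equal_semantic_primary : Prop := ∀ (tags : List String), Dom_semantic_primary tags → Spec_semantic_primary tags (semantic_primary tags)

-- ===== LEMMAS AND PROOFS =====

-- the min-accumulating step that bLoop's best-update performs, per rank
def stepMin (b : Option Int) (r : Int) : Option Int :=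
  some (match b with | none => r | some x => min x r)

def rk (s : String) : Option Int := rankDict.get? s

lemma rk_cases {t : String} {r : Int} (h : rk t = some r) :
    (r = 0 ∧ t = "highly_stable") ∨ (r = 1 ∧ t = "strengthening_structure") ∨
    (r = 2 ∧ t = "improving_stability") ∨ (r = 3 ∧ t = "low_hazard_environment") ∨
    (r = 4 ∧ t = "high_rupture_event") ∨ (r = 5 ∧ t = "chaotic_price_action") := by
  have e : rankDict = PySem.Dict.mk
    [("highly_stable", 0), ("strengthening_structure", 1), ("improving_stability", 2),
     ("low_hazard_environment", 3), ("high_rupture_event", 4), ("chaotic_price_action", 5)] := by decide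
  unfold rk at h
  rw [e] at h
  simp [PySem.Dict.get?_mk_cons] at h
  split_ifs at h <;> simp_all [PySem.Dict.get?]

lemma bLoop_first (ts : List String) (first : Option String) (best : Option Int) :
    (bLoop ts first best).1 = first.or ((ts.map PySem.Str.lower).head?) := by
  induction ts generalizing first best with
  | nil => cases first <;> simp [bLoop]
  | cons t ts ih => cases first <;> simp [bLoop, ih]

lemma bLoop_best (ts : List String) (first : Option String) (best : Option Int) :
    (bLoop ts first best).2 = ((ts.map PySem.Str.lower).filterMap rk).foldl stepMin best := by
  induction ts generalizing first best with
  | nil => simp [bLoop]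
  | cons t ts ih =>
    simp only [bLoop, List.map_cons, List.filterMap_cons]
    cases hr : rankDict.get? (PySem.Str.lower t) with
    | none => simp only [show rk (PySem.Str.lower t) = none from hr, ih]
    | some r =>
      rw [show rk (PySem.Str.lower t) = some r from hr]
      simp only [List.foldl_cons, ih]
      congr 1
      cases best with
      | none => rfl
      | some b => simp only [stepMin]; split_ifs <;> simp <;> omega

lemma foldl_stepMin_some (x : Int) (l : List Int) :
    ∃ m, l.foldl stepMin (some x) = some m ∧ m ≤ x := by
  induction l generalizing x with
  | nil => exact ⟨x, rfl, le_refl x⟩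
  | cons a l ih =>
    obtain ⟨m, hm, hle⟩ := ih (min x a)
    exact ⟨m, hm, le_trans hle (min_le_left x a)⟩

lemma foldl_stepMin_le {l : List Int} {r : Int} (hr : r ∈ l) (b : Option Int) :
    ∃ m, l.foldl stepMin b = some m ∧ m ≤ r := by
  induction l generalizing b with
  | nil => cases hr
  | cons a l ih =>
    rcases List.mem_cons.mp hr with rfl | hr'
    · cases b with
      | none =>
        obtain ⟨m, hm, hle⟩ := foldl_stepMin_some r l
        exact ⟨m, hm, hle⟩
      | some x =>
        obtain ⟨m, hm, hle⟩ := foldl_stepMin_some (min x r) l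
        exact ⟨m, hm, le_trans hle (min_le_right x r)⟩
    · exact ih hr' (stepMin b a)

lemma foldl_stepMin_lb {i : Int} {l : List Int} (hl : ∀ r ∈ l, i ≤ r) {b : Option Int}
    (hb : ∀ x, b = some x → i ≤ x) {m : Int} (h : l.foldl stepMin b = some m) : i ≤ m := by
  induction l generalizing b with
  | nil => exact hb m h
  | cons a l ih =>
    refine ih (fun r hr => hl r (List.mem_cons_of_mem a hr)) ?_ h
    intro x hx
    have ha := hl a (List.mem_cons_self)
    cases b with
    | none => simp [stepMin] at hx; omega
    | some y =>
      have hy := hb y rfl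
      simp [stepMin] at hx
      omega

theorem key_eq (L : List String) :
    (match aLoop L priorityA with
     | some k => k
     | none => match L with | [] => "none" | t :: _ => t)
    =
    (match (L.filterMap rk).foldl stepMin (none : Option Int) with
     | some r => (PySem.List.pyGet? priorityB r).getD ""
     | none => match L with | [] => "none" | t :: _ => t) := by
  have mem_rk : ∀ {t : String} {i : Int}, t ∈ L → rk t = some i → i ∈ L.filterMap rk :=
    fun h hr => List.mem_filterMap.mpr ⟨_, h, hr⟩
  have key_case : ∀ (i : Int), i ∈ L.filterMap rk → (∀ r ∈ L.filterMap rk, i ≤ r) →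
      (L.filterMap rk).foldl stepMin (none : Option Int) = some i := by
    intro i hi hlb
    obtain ⟨m, hm, hle⟩ := foldl_stepMin_le hi (none : Option Int)
    have hge := foldl_stepMin_lb hlb (by intro x hx; cases hx) hm
    rw [hm, le_antisymm hle hge]
  by_cases h0 : "highly_stable" ∈ L
  · rw [key_case 0 (mem_rk h0 (by decide)) ?_]
    · simp [aLoop, priorityA, h0]; decide
    · intro r hr
      obtain ⟨t, htL, hrk⟩ := List.mem_filterMap.mp hr
      rcases rk_cases hrk with ⟨rfl, rfl⟩ | ⟨rfl, rfl⟩ | ⟨rfl, rfl⟩ | ⟨rfl, rfl⟩ | ⟨rfl, rfl⟩ | ⟨rfl, rfl⟩ <;> omega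
  by_cases h1 : "strengthening_structure" ∈ L
  · rw [key_case 1 (mem_rk h1 (by decide)) ?_]
    · simp [aLoop, priorityA, h0, h1]; decide
    · intro r hr
      obtain ⟨t, htL, hrk⟩ := List.mem_filterMap.mp hr
      rcases rk_cases hrk with ⟨rfl, rfl⟩ | ⟨rfl, rfl⟩ | ⟨rfl, rfl⟩ | ⟨rfl, rfl⟩ | ⟨rfl, rfl⟩ | ⟨rfl, rfl⟩ <;> first | omega | exact absurd htL h0
  by_cases h2 : "improving_stability" ∈ L
  · rw [key_case 2 (mem_rk h2 (by decide)) ?_]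
    · simp [aLoop, priorityA, h0, h1, h2]; decide
    · intro r hr
      obtain ⟨t, htL, hrk⟩ := List.mem_filterMap.mp hr
      rcases rk_cases hrk with ⟨rfl, rfl⟩ | ⟨rfl, rfl⟩ | ⟨rfl, rfl⟩ | ⟨rfl, rfl⟩ | ⟨rfl, rfl⟩ | ⟨rfl, rfl⟩ <;> first | omega | exact absurd htL h0 | exact absurd htL h1
  by_cases h3 : "low_hazard_environment" ∈ L
  · rw [key_case 3 (mem_rk h3 (by decide)) ?_]
    · simp [aLoop, priorityA, h0, h1, h2, h3]; decide
    · intro r hr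
      obtain ⟨t, htL, hrk⟩ := List.mem_filterMap.mp hr
      rcases rk_cases hrk with ⟨rfl, rfl⟩ | ⟨rfl, rfl⟩ | ⟨rfl, rfl⟩ | ⟨rfl, rfl⟩ | ⟨rfl, rfl⟩ | ⟨rfl, rfl⟩ <;> first | omega | exact absurd htL h0 | exact absurd htL h1 | exact absurd htL h2
  by_cases h4 : "high_rupture_event" ∈ L
  · rw [key_case 4 (mem_rk h4 (by decide)) ?_]
    · simp [aLoop, priorityA, h0, h1, h2, h3, h4]; decide
    · intro r hr
      obtain ⟨t, htL, hrk⟩ := List.mem_filterMap.mp hr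
      rcases rk_cases hrk with ⟨rfl, rfl⟩ | ⟨rfl, rfl⟩ | ⟨rfl, rfl⟩ | ⟨rfl, rfl⟩ | ⟨rfl, rfl⟩ | ⟨rfl, rfl⟩ <;> first | omega | exact absurd htL h0 | exact absurd htL h1 | exact absurd htL h2 | exact absurd htL h3
  by_cases h5 : "chaotic_price_action" ∈ L
  · rw [key_case 5 (mem_rk h5 (by decide)) ?_]
    · simp [aLoop, priorityA, h0, h1, h2, h3, h4, h5]; decide
    · intro r hr
      obtain ⟨t, htL, hrk⟩ := List.mem_filterMap.mp hr
      rcases rk_cases hrk with ⟨rfl, rfl⟩ | ⟨rfl, rfl⟩ | ⟨rfl, rfl⟩ | ⟨rfl, rfl⟩ | ⟨rfl, rfl⟩ | ⟨rfl, rfl⟩ <;> first | omega | exact absurd htL h0 | exact absurd htL h1 | exact absurd htL h2 | exact absurd htL h3 | exact absurd htL h4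
  · have hnil : L.filterMap rk = [] := by
      rw [List.filterMap_eq_nil_iff]
      intro t htL
      cases hrk : rk t with
      | none => rfl
      | some r =>
        rcases rk_cases hrk with ⟨rfl, rfl⟩ | ⟨rfl, rfl⟩ | ⟨rfl, rfl⟩ | ⟨rfl, rfl⟩ | ⟨rfl, rfl⟩ | ⟨rfl, rfl⟩ <;>
          first | exact absurd htL h0 | exact absurd htL h1 | exact absurd htL h2 | exact absurd htL h3 | exact absurd htL h4 | exact absurd htL h5
    rw [hnil]
    simp [aLoop, priorityA, h0, h1, h2, h3, h4, h5]

-- ===== VERDICT (by name: the statement is the Claim_ definition above) =====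
theorem semantic_primary_spec : Claim_equal_semantic_primary := by
  intro tags _
  unfold Spec_semantic_primary semantic_primary semantic_primary_alt
  have h1 := bLoop_first tags none none
  have h2 := bLoop_best tags none none
  cases hbl : bLoop tags none none with
  | mk f b =>
    rw [hbl] at h1 h2
    simp only [Option.none_or] at h1
    simp only at h2
    subst h1 h2
    have hk := key_eq (tags.map PySem.Str.lower)
    cases hfold : ((tags.map PySem.Str.lower).filterMap rk).foldl stepMin (none : Option Int) with
    | none =>
      rw [hfold] at hk
      simp only at hk
      rw [hk]
      cases tags <;> simp
    | some r =>
      rw [hfold] at hk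
      simp only at hk
      rw [hk]
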